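-- pv_equiv track=rewrite | github.com/StarsExpress/LeetCode-Repository | greedy/sequence_maker.py | make_sequence
-- ===== SOURCE A (Python) =====
-- def make_sequence(target: list[int], array: list[int]) -> int:  # LeetCode Q.1713.
--     nums2indices, total_targets = dict(), 0
--     for idx, number in enumerate(target):  # Target array is distinct.
--         nums2indices.update({number: idx})
--         total_targets += 1
--
--     new_arr = []
--     for number in array:
--         if number in nums2indices.keys():
--             new_arr.append(nums2indices[number])
--
--     rising_subsequence, subsequence_len = [], 0
--     for number in new_arr:
--         # After binary search is over, back idx is insertion idx.
--         back_idx, front_idx = 0, subsequence_len - 1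
--         while back_idx <= front_idx:
--             mid_idx = (back_idx + front_idx) // 2
--             if rising_subsequence[mid_idx] < number:
--                 back_idx = mid_idx + 1
--                 continue
--             front_idx = mid_idx - 1
--
--         if back_idx == subsequence_len:
--             rising_subsequence.append(number)
--             subsequence_len += 1
--
--         else:
--             rising_subsequence[back_idx] = number
--
--     return total_targets - subsequence_len  # Min operations needed to make sequence.
-- ===== SOURCE B (Python) =====
-- def make_sequence(target: list[int], array: list[int]) -> int:  # LeetCode Q.1713.
--     indices = {number: idx for idx, number in enumerate(target)}
--     new_arr = [indices[number] for number in array if number in indices]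
--
--     dp = []  # (value, length of longest rising subsequence ending at this value)
--     best_overall = 0
--     for x in new_arr:
--         best = 0
--         for value, length in dp:
--             if value < x and length > best:
--                 best = length
--         dp.append((x, best + 1))
--         if best + 1 > best_overall:
--             best_overall = best + 1
--
--     return len(target) - best_overall
-- ===== Notes on version B (the rewrite author's own statement) =====
-- stated objective: simpler
-- what changed: Replaced the patience-sorting tails array with hand-written binary search by a plain quadratic dynamic program (dp[i] = 1 + best dp over earlier smaller values) and a dict/list comprehension for the preprocessing; same exact result, shorter and plainer code.
import Mathlib
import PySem

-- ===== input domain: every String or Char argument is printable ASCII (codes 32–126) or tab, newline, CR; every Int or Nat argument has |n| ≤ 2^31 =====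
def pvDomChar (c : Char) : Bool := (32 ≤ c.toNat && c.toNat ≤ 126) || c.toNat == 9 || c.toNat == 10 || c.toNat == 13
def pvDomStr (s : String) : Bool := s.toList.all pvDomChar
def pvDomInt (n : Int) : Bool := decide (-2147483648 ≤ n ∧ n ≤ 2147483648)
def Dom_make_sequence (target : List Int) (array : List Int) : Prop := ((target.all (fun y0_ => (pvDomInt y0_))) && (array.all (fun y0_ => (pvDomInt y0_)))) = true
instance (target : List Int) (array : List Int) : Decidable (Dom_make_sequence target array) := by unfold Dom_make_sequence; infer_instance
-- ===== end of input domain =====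

-- B replaces A's patience-sorting tails array (with a hand-written binary search) by a
-- plain quadratic LIS dynamic program; same exact return value, shorter and plainer code.

-- ===== PORT A =====
-- A's inner while-loop binary search.  `rising_subsequence[mid_idx]` is always in range
-- when reached by the algorithm (0 ≤ back ≤ mid ≤ front ≤ len-1), so `.getD 0` is exact there.
def bsA (tails : List Int) (x : Int) (back front : Int) : Int :=
  if _h : back ≤ front then
    let mid := PySem.Int.floordiv (back + front) 2
    if (PySem.List.pyGet? tails mid).getD 0 < x then
      bsA tails x (mid + 1) front
    else
      bsA tails x back (mid - 1)
  else back
termination_by (front + 1 - back).toNat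
decreasing_by
  · have := PySem.Int.floordiv_two_mid_bounds _h
    omega
  · have := PySem.Int.floordiv_two_mid_bounds _h
    omega

-- one iteration of A's main loop; state = (rising_subsequence, subsequence_len).
-- `rising_subsequence[back_idx] = number` hits an in-range nonnegative index, so `.set b.toNat` is exact.
def stepA (s : List Int × Int) (number : Int) : List Int × Int :=
  let b := bsA s.1 number 0 (s.2 - 1)
  if b = s.2 then (s.1 ++ [number], s.2 + 1)
  else (s.1.set b.toNat number, s.2)

def make_sequence (target : List Int) (array : List Int) : Int :=
  let st := (PySem.List.enumerate target 0).foldl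
      (fun (s : PySem.Dict Int Int × Int) p => (s.1.insert p.2 p.1, s.2 + 1))
      (PySem.Dict.empty, 0)
  let new_arr := array.foldl (fun acc number =>
      match st.1.get? number with
      | some i => acc ++ [i]
      | none => acc) []
  let fin := new_arr.foldl stepA ([], 0)
  st.2 - fin.2

-- ===== PORT B =====
-- one iteration of B's loop; state = (dp as list of (value, length) pairs, best_overall).
def stepB (s : List (Int × Int) × Int) (x : Int) : List (Int × Int) × Int :=
  let best := s.1.foldl (fun b p => if p.1 < x ∧ p.2 > b then p.2 else b) 0
  (s.1 ++ [(x, best + 1)], if best + 1 > s.2 then best + 1 else s.2)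

def make_sequence_alt (target : List Int) (array : List Int) : Int :=
  let indices := (PySem.List.enumerate target 0).foldl
      (fun (d : PySem.Dict Int Int) p => d.insert p.2 p.1) PySem.Dict.empty
  let new_arr := array.filterMap (fun number => indices.get? number)
  let fin := new_arr.foldl stepB ([], 0)
  (target.length : Int) - fin.2

-- ===== PRECONDITION & SPEC =====
def Spec_make_sequence (target : List Int) (array : List Int) (out : Int) : Prop := out = make_sequence_alt target array
instance (target : List Int) (array : List Int) (out : Int) : Decidable (Spec_make_sequence target array out) := by unfold Spec_make_sequence; infer_instance

-- ===== CLAIM (what is proved, stated in full; the proofs are below) =====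
def Claim_equal_make_sequence : Prop := ∀ (target : List Int) (array : List Int), Dom_make_sequence target array → Spec_make_sequence target array (make_sequence target array)

-- ===== LEMMAS AND PROOFS =====

-- minimum value carrying a given dp length
def minAt (dp : List (Int × Int)) (m : Int) : Option Int :=
  ((dp.filter (fun p => p.2 == m)).map (·.1)).min?

-- the coupling invariant between A's tails array and B's dp table
def lisInv (dp : List (Int × Int)) (tails : List Int) : Prop :=
  (∀ p ∈ dp, 1 ≤ p.2 ∧ p.2 ≤ (tails.length : Int)) ∧
  (∀ k : Nat, (hk : k < tails.length) → minAt dp ((k : Int) + 1) = some (tails[k])) ∧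
  tails.Pairwise (· < ·)

-- in a strictly increasing list, the elements < x are exactly the first countP of them
lemma sorted_countP_char (tails : List Int) (hs : tails.Pairwise (· < ·)) (x : Int) :
    ∀ k, (hk : k < tails.length) → (tails[k] < x ↔ k < tails.countP (fun t => decide (t < x))) := by
  induction tails with
  | nil => intro k hk; simp at hk
  | cons a t ih =>
      have ha : ∀ b ∈ t, a < b := fun b hb => List.rel_of_pairwise_cons hs hb
      have hpt : t.Pairwise (· < ·) := hs.of_cons
      intro k hk
      by_cases hax : a < x
      · cases k with
        | zero =>
            simp only [List.getElem_cons_zero, List.countP_cons, hax, decide_true, if_true]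
            simp
        | succ k =>
            have hk' : k < t.length := by simpa using hk
            have hiff := ih hpt k hk'
            simp only [List.getElem_cons_succ, List.countP_cons, hax, decide_true, if_true]
            rw [hiff]
            omega
      · have ht0 : t.countP (fun t => decide (t < x)) = 0 := by
          rw [List.countP_eq_zero]
          intro b hb
          have := ha b hb
          simp only [decide_eq_true_eq]
          omega
        have hc0 : (a :: t).countP (fun t => decide (t < x)) = 0 := by
          simp [hax, ht0]
        rw [hc0]
        cases k with
        | zero => simp [hax]
        | succ k =>
            have hk' : k < t.length := by simpa using hk
            simp only [List.getElem_cons_succ]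
            constructor
            · intro hlt
              exact absurd (lt_trans (ha _ (List.getElem_mem hk')) hlt) hax
            · omega

-- A's binary search returns the insertion point = count of elements < x
lemma bsA_spec (tails : List Int) (x : Int) (c : Nat)
    (hchar : ∀ k, (hk : k < tails.length) → (tails[k] < x ↔ k < c))
    (_hcle : c ≤ tails.length) :
    ∀ back front : Int, 0 ≤ back → front ≤ (tails.length : Int) - 1 →
      back ≤ (c : Int) → (c : Int) ≤ front + 1 → bsA tails x back front = (c : Int) := by
  intro back front
  fun_induction bsA tails x back front with
  | case1 back front _h mid hlt ih =>
      intro h1 h2 h3 h4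
      have hb := PySem.Int.floordiv_two_mid_bounds _h
      have hmr : 0 ≤ mid ∧ mid < (tails.length : Int) := by omega
      have hmn : mid.toNat < tails.length := by omega
      rw [PySem.List.pyGet?_of_nonneg tails hmr.1, List.getElem?_eq_getElem hmn] at hlt
      simp only [Option.getD_some] at hlt
      have : mid.toNat < c := (hchar mid.toNat hmn).mp hlt
      exact ih (by omega) h2 (by omega) h4
  | case2 back front _h mid hlt ih =>
      intro h1 h2 h3 h4
      have hb := PySem.Int.floordiv_two_mid_bounds _h
      have hmr : 0 ≤ mid ∧ mid < (tails.length : Int) := by omega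
      have hmn : mid.toNat < tails.length := by omega
      rw [PySem.List.pyGet?_of_nonneg tails hmr.1, List.getElem?_eq_getElem hmn] at hlt
      simp only [Option.getD_some] at hlt
      have : ¬ mid.toNat < c := fun hc => hlt ((hchar mid.toNat hmn).mpr hc)
      exact ih h1 (by omega) h3 (by omega)
  | case3 back front _h =>
      intro h1 h2 h3 h4
      omega

-- characterisation of B's inner max-loop
lemma bo_ge_init (dp : List (Int × Int)) (x init : Int) :
    init ≤ dp.foldl (fun b p => if p.1 < x ∧ p.2 > b then p.2 else b) init := by
  induction dp generalizing init with
  | nil => simp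
  | cons q l ih =>
      simp only [List.foldl_cons]
      split_ifs with h
      · exact le_trans (le_of_lt h.2) (ih q.2)
      · exact ih init

lemma bo_ge_mem (dp : List (Int × Int)) (x init : Int) (p : Int × Int) (hp : p ∈ dp) (hx : p.1 < x) :
    p.2 ≤ dp.foldl (fun b p => if p.1 < x ∧ p.2 > b then p.2 else b) init := by
  induction dp generalizing init with
  | nil => simp at hp
  | cons q l ih =>
      simp only [List.foldl_cons]
      rcases List.mem_cons.mp hp with rfl | hq
      · split_ifs with h
        · exact bo_ge_init l x p.2
        · have hle : p.2 ≤ init := by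
            by_contra hc
            exact h ⟨hx, by omega⟩
          exact le_trans hle (bo_ge_init l x init)
      · split_ifs <;> exact ih _ hq

lemma bo_cases (dp : List (Int × Int)) (x init : Int) :
    dp.foldl (fun b p => if p.1 < x ∧ p.2 > b then p.2 else b) init = init ∨
      ∃ p ∈ dp, p.1 < x ∧ dp.foldl (fun b p => if p.1 < x ∧ p.2 > b then p.2 else b) init = p.2 := by
  induction dp generalizing init with
  | nil => simp
  | cons q l ih =>
      simp only [List.foldl_cons]
      split_ifs with h
      · rcases ih q.2 with h0 | ⟨p, hp, hpx, hpe⟩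
        · exact Or.inr ⟨q, List.mem_cons_self, h.1, h0⟩
        · exact Or.inr ⟨p, List.mem_cons_of_mem _ hp, hpx, hpe⟩
      · rcases ih init with h0 | ⟨p, hp, hpx, hpe⟩
        · exact Or.inl h0
        · exact Or.inr ⟨p, List.mem_cons_of_mem _ hp, hpx, hpe⟩

lemma min?_concat (L : List Int) (x : Int) :
    (L ++ [x]).min? = some (match L.min? with | none => x | some w => min w x) := by
  cases h : L.min? with
  | none =>
      have : L = [] := List.min?_eq_none_iff.mp h
      simp [this]
  | some w =>
      have hw := List.min?_eq_some_iff.mp h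
      rw [List.min?_eq_some_iff]
      simp only []
      constructor
      · rcases min_choice w x with hm | hm
        · rw [hm]; exact List.mem_append_left _ hw.1
        · rw [hm]; simp
      · intro b hb
        rcases List.mem_append.mp hb with hb | hb
        · exact le_trans (min_le_left _ _) (hw.2 b hb)
        · simp at hb; subst hb; exact min_le_right _ _

lemma minAt_append_single (dp : List (Int × Int)) (x d0 m : Int) :
    minAt (dp ++ [(x, d0)]) m =
      if m = d0 then some (match minAt dp m with | none => x | some w => min w x)
      else minAt dp m := by
  unfold minAt
  rw [List.filter_append]
  by_cases h : m = d0
  · subst h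
    simp only [List.filter_cons, beq_self_eq_true]
    simp [min?_concat]
  · have hne : (d0 == m) = false := by simp [Ne.symm h]
    simp [hne, h]

lemma minAt_eq_none_of_bounds (dp : List (Int × Int)) (B m : Int) (hb : ∀ p ∈ dp, p.2 ≤ B) (hm : B < m) :
    minAt dp m = none := by
  unfold minAt
  have : dp.filter (fun p => p.2 == m) = [] := by
    rw [List.filter_eq_nil_iff]
    intro p hp
    have := hb p hp
    simp only [beq_iff_eq]
    omega
  simp [this]

lemma minAt_mem (dp : List (Int × Int)) (m w : Int) (h : minAt dp m = some w) :
    ∃ p ∈ dp, p.1 = w ∧ p.2 = m := by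
  unfold minAt at h
  have hmem := List.min?_mem h
  rcases List.mem_map.mp hmem with ⟨p, hp, hpw⟩
  rcases List.mem_filter.mp hp with ⟨hpd, hpm⟩
  exact ⟨p, hpd, hpw, by simpa using hpm⟩

lemma minAt_le (dp : List (Int × Int)) (m w : Int) (h : minAt dp m = some w)
    (p : Int × Int) (hp : p ∈ dp) (hm : p.2 = m) : w ≤ p.1 := by
  unfold minAt at h
  refine (List.min?_eq_some_iff.mp h).2 p.1 ?_
  exact List.mem_map.mpr ⟨p, List.mem_filter.mpr ⟨hp, by simp [hm]⟩, rfl⟩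

-- the simulation relation between the two loop states
def lisRel (s : List Int × Int) (t : List (Int × Int) × Int) : Prop :=
  lisInv t.1 s.1 ∧ s.2 = (s.1.length : Int) ∧ t.2 = (s.1.length : Int)

lemma step_sim (s : List Int × Int) (t : List (Int × Int) × Int) (h : lisRel s t) (x : Int) :
    lisRel (stepA s x) (stepB t x) := by
  obtain ⟨⟨hbd, hmin, hsort⟩, hn, hbest⟩ := h
  have hchar := sorted_countP_char s.1 hsort x
  set c := s.1.countP (fun t => decide (t < x)) with hc
  have hcle : c ≤ s.1.length := List.countP_le_length
  have hbs : bsA s.1 x 0 (s.2 - 1) = (c : Int) := by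
    apply bsA_spec s.1 x c hchar hcle
    · omega
    · omega
    · omega
    · omega
  have hbo : t.1.foldl (fun b p => if p.1 < x ∧ p.2 > b then p.2 else b) 0 = (c : Int) := by
    apply le_antisymm
    · rcases bo_cases t.1 x 0 with h0 | ⟨p, hp, hpx, hpe⟩
      · rw [h0]; positivity
      · rw [hpe]
        have hb1 := hbd p hp
        have hj : ((p.2 - 1).toNat : Int) = p.2 - 1 := by omega
        have hjlt : (p.2 - 1).toNat < s.1.length := by omega
        have hm := hmin (p.2 - 1).toNat hjlt
        rw [hj] at hm
        have hle : s.1[(p.2 - 1).toNat] ≤ p.1 :=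
          minAt_le t.1 _ _ (by rw [show p.2 - 1 + 1 = p.2 by ring] at hm; exact hm) p hp rfl
        have : (p.2 - 1).toNat < c := (hchar _ hjlt).mp (lt_of_le_of_lt hle hpx)
        omega
    · by_cases hc0 : c = 0
      · rw [hc0]
        simpa using bo_ge_init t.1 x 0
      · have hjlt : c - 1 < s.1.length := by omega
        have hlt : s.1[c - 1] < x := (hchar _ hjlt).mpr (by omega)
        have hm := hmin (c - 1) hjlt
        rcases minAt_mem t.1 _ _ hm with ⟨p, hp, hp1, hp2⟩
        have hge := bo_ge_mem t.1 x 0 p hp (by rw [hp1]; exact hlt)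
        have : p.2 = (c : Int) := by rw [hp2]; omega
        omega
  by_cases hceq : (c : Int) = s.2
  · -- append case: insertion point = current length
    have hclen : c = s.1.length := by omega
    have h1 : stepA s x = (s.1 ++ [x], s.2 + 1) := by
      unfold stepA; rw [hbs, if_pos hceq]
    have h2 : stepB t x = (t.1 ++ [(x, (c : Int) + 1)], (c : Int) + 1) := by
      simp only [stepB, hbo]; rw [if_pos (by omega)]
    rw [h1, h2]
    refine ⟨⟨?_, ?_, ?_⟩, ?_, ?_⟩
    · intro p hp
      simp only [List.length_append, List.length_cons, List.length_nil]
      rcases List.mem_append.mp hp with hp | hp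
      · have := hbd p hp
        push_cast; omega
      · simp only [List.mem_singleton] at hp
        rw [hp]
        simp only []
        push_cast; omega
    · intro k hk
      simp only [List.length_append, List.length_cons, List.length_nil] at hk
      rw [minAt_append_single]
      by_cases hkc : k = c
      · rw [if_pos (show ((k : Int) + 1) = (c : Int) + 1 by omega),
          minAt_eq_none_of_bounds t.1 (s.1.length : Int) _ (fun p hp => (hbd p hp).2)
            (by omega)]
        have hx : (s.1 ++ [x])[k]'(by simp; omega) = x := by
          rw [List.getElem_append_right (by omega)]
          simp [hkc, hclen]
        rw [hx]
      · have hklen : k < s.1.length := by omega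
        rw [if_neg (by omega), hmin k hklen, List.getElem_append_left hklen]
    · rw [List.pairwise_append]
      refine ⟨hsort, List.pairwise_singleton _ _, ?_⟩
      intro a ha b hb
      simp only [List.mem_singleton] at hb
      subst hb
      rcases List.mem_iff_getElem.mp ha with ⟨k, hk, rfl⟩
      exact (hchar k hk).mpr (by omega)
    · simp only [List.length_append, List.length_cons, List.length_nil]
      push_cast; omega
    · simp only [List.length_append, List.length_cons, List.length_nil]
      push_cast; omega
  · -- replacement case: insertion point strictly inside the tails array
    have hclen : c < s.1.length := by omega
    have hxc : ¬ s.1[c] < x := fun hlt => absurd ((hchar c hclen).mp hlt) (by omega)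
    have h1 : stepA s x = (s.1.set c x, s.2) := by
      unfold stepA; rw [hbs, if_neg hceq, Int.toNat_natCast]
    have h2 : stepB t x = (t.1 ++ [(x, (c : Int) + 1)], t.2) := by
      simp only [stepB, hbo]; rw [if_neg (by omega)]
    rw [h1, h2]
    refine ⟨⟨?_, ?_, ?_⟩, ?_, ?_⟩
    · intro p hp
      rw [List.length_set]
      rcases List.mem_append.mp hp with hp | hp
      · exact hbd p hp
      · simp only [List.mem_singleton] at hp
        rw [hp]
        simp only []
        omega
    · intro k hk
      rw [List.length_set] at hk
      rw [minAt_append_single]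
      by_cases hkc : k = c
      · subst hkc
        rw [if_pos rfl, hmin c hk, List.getElem_set_self]
        simp only []
        rw [min_eq_right (by omega)]
      · rw [if_neg (by omega), hmin k hk, List.getElem_set_ne (by omega)]
    · rw [List.pairwise_iff_getElem]
      intro i j hi hj hij
      rw [List.length_set] at hi hj
      have hold := List.pairwise_iff_getElem.mp hsort
      by_cases hjc : j = c
      · subst hjc
        rw [List.getElem_set_self, List.getElem_set_ne (by omega)]
        exact (hchar i (by omega)).mpr (by omega)
      · by_cases hic : i = c
        · subst hic
          rw [List.getElem_set_self, List.getElem_set_ne (by omega)]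
          have := hold c j hi hj hij
          omega
        · rw [List.getElem_set_ne (by omega), List.getElem_set_ne (by omega)]
          exact hold i j hi hj hij
    · rw [List.length_set]
      exact hn
    · rw [List.length_set]
      omega

lemma fold_sim (l : List Int) : ∀ s t, lisRel s t → lisRel (l.foldl stepA s) (l.foldl stepB t) := by
  intro s t h
  induction l generalizing s t with
  | nil => exact h
  | cons a l ih => exact ih _ _ (step_sim s t h a)

lemma dict_fold_eq (target : List Int) :
    (PySem.List.enumerate target 0).foldl
      (fun (s : PySem.Dict Int Int × Int) p => (s.1.insert p.2 p.1, s.2 + 1))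
      (PySem.Dict.empty, 0) =
    ((PySem.List.enumerate target 0).foldl
      (fun (d : PySem.Dict Int Int) p => d.insert p.2 p.1) PySem.Dict.empty,
     (target.length : Int)) := by
  rw [PySem.List.foldl_prod_mk (f := fun (d : PySem.Dict Int Int) (p : Int × Int) => d.insert p.2 p.1)
      (g := fun (t : Int) (_ : Int × Int) => t + 1)]
  rw [PySem.List.foldl_add (g := fun (_ : Int × Int) => 1)]
  simp [PySem.List.length_enumerate]

lemma new_arr_eq (d : PySem.Dict Int Int) (array : List Int) : ∀ acc : List Int,
    array.foldl (fun acc number =>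
      match d.get? number with
      | some i => acc ++ [i]
      | none => acc) acc = acc ++ array.filterMap (fun number => d.get? number) := by
  induction array with
  | nil => simp
  | cons a l ih =>
      intro acc
      cases h : d.get? a with
      | none => simp [h, ih]
      | some i => simp [h, ih]

-- ===== VERDICT (by name: the statement is the Claim_ definition above) =====
theorem make_sequence_spec : Claim_equal_make_sequence := by
  intro target array _
  simp only [Spec_make_sequence, make_sequence, make_sequence_alt, dict_fold_eq, new_arr_eq,
    List.nil_append]
  have h := fold_sim (array.filterMap (fun number =>
      ((PySem.List.enumerate target 0).foldl
        (fun (d : PySem.Dict Int Int) p => d.insert p.2 p.1) PySem.Dict.empty).get? number))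
      ([], 0) ([], 0) ⟨⟨by simp, by intro k hk; simp at hk, List.Pairwise.nil⟩, by simp, by simp⟩
  obtain ⟨-, h1, h2⟩ := h
  omega
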